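-- pv_equiv track=rewrite | github.com/donghs1541/CodingTestPractice | Programmers/Level 2/문자열 압축.py | solution
-- ===== SOURCE A (Python) =====
-- def solution(s):
--     answer = 1000
--     for i in range(1,int(len(s)/2)+2): # 1~ 문자열 크기의 절반 +2까지
--         zipString = "" #추가할 문자열 초기값
--         zipCount=1 #초기 문자열 크기
--         preStr = s[0:i]  #초기 문자열
--         for j in range(i,len(s)+1,i): # i 크기만큼 나누어서 문자열 비교함
--             nextStr = s[j:j+i]
--             if preStr == nextStr:
--                 zipCount += 1
--             else:
--                 if zipCount >= 2:
--                     zipString = zipString + str(zipCount) + preStr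
--                 else:
--                     zipString = zipString + preStr
--                 zipCount = 1
--                 preStr = nextStr
--         zipString += preStr
--
--         if answer > len(zipString): # 이중 폴문의 작업이 끝난 스트링의 크기를 비교해 더 작은 값을 answer로 정함
--             answer = len(zipString)
--
--     return answer
-- ===== SOURCE B (Python) =====
-- def solution(s):
--     L = len(s)
--     best = 1000
--     for i in range(1, L // 2 + 2):
--         saved = 0
--         k = 0
--         while k + i < L:
--             c = 1
--             while s[k:k + i] == s[k + i:k + 2 * i]:
--                 c += 1
--                 k += i
--             if c >= 2:
--                 saved += i * (c - 1) - len(str(c))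
--             k += i
--         if L - saved < best:
--             best = L - saved
--     return best
-- ===== Notes on version B (the rewrite author's own statement) =====
-- stated objective: alternative
-- what changed: Instead of building the compressed string chunk-by-chunk via A's preStr/zipCount state machine and measuring it, B never constructs any string: it jumps through positions run-by-run with a nested while loop, accumulates the numeric savings i*(c-1)-len(str(c)) of each repeated run, and returns len(s) minus the savings.
import Mathlib
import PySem

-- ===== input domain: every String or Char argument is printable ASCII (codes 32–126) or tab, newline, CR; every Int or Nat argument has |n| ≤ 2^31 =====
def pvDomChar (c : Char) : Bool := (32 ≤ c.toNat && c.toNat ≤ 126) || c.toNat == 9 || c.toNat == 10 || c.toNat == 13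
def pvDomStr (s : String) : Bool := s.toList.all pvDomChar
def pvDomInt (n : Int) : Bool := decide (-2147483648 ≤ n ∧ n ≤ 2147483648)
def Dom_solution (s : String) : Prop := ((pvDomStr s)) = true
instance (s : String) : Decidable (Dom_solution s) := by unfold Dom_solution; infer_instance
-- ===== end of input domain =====

-- B builds no compressed string at all: it jumps position-by-run with nested while loops,
-- accumulates the numeric savings i*(c-1)-len(str(c)) of each repeated run, and returns len(s)-savings.

-- ===== PORT A =====
-- loop body of A's inner 'for j' loop (state = (zipString, zipCount, preStr))
def zipStep (i : Int) (cs : List Char) (st : List Char × Int × List Char) (j : Int) :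
    List Char × Int × List Char :=
  let nextStr := PySem.List.slice cs (some j) (some (j + i))
  if st.2.2 = nextStr then (st.1, st.2.1 + 1, st.2.2)
  else if st.2.1 ≥ 2 then (st.1 ++ PySem.Int.toChars st.2.1 ++ st.2.2, 1, nextStr)
  else (st.1 ++ st.2.2, 1, nextStr)

-- A's inner loop for one chunk size i, returning len(zipString) (incl. the trailing 'zipString += preStr')
def zipLen (cs : List Char) (i : Int) : Int :=
  let st := (PySem.List.pyRange i ((cs.length : Int) + 1) i).foldl (zipStep i cs)
    ([], 1, PySem.List.slice cs (some 0) (some i))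
  (((st.1 ++ st.2.2).length : Int))

def solution (s : String) : Int :=
  (PySem.List.pyRange 1 (PySem.Int.truncdiv (PySem.Str.len s) 2 + 2) 1).foldl
    (fun answer i =>
      let z := zipLen s.toList i
      if answer > z then z else answer) 1000

-- ===== PORT B =====
-- inner 'while s[k:k+i] == s[k+i:k+2*i]' loop (fuel bounds the while; len(s) is always enough)
def runLoop (cs : List Char) (i : Int) : Nat → Int → Int → Int × Int
  | 0, k, c => (k, c)
  | fuel+1, k, c =>
    if PySem.List.slice cs (some k) (some (k + i))
        = PySem.List.slice cs (some (k + i)) (some (k + 2*i)) then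
      runLoop cs i fuel (k + i) (c + 1)
    else (k, c)

-- outer 'while k + i < L' loop, accumulating the savings
def savedLoop (cs : List Char) (i : Int) : Nat → Int → Int → Int
  | 0, _, saved => saved
  | fuel+1, k, saved =>
    if k + i < (cs.length : Int) then
      let p := runLoop cs i cs.length k 1
      let saved2 := if p.2 ≥ 2 then
          saved + (i * (p.2 - 1) - ((PySem.Int.toChars p.2).length : Int)) else saved
      savedLoop cs i fuel (p.1 + i) saved2
    else saved

def solution_alt (s : String) : Int :=
  let L := PySem.Str.len s
  (PySem.List.pyRange 1 (PySem.Int.floordiv L 2 + 2) 1).foldl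
    (fun best i =>
      let saved := savedLoop s.toList i (s.toList.length + 1) 0 0
      if L - saved < best then L - saved else best) 1000

-- ===== PRECONDITION & SPEC =====
def Spec_solution (s : String) (out : Int) : Prop := out = solution_alt s
instance (s : String) (out : Int) : Decidable (Spec_solution s out) := by unfold Spec_solution; infer_instance

-- ===== CLAIM (what is proved, stated in full; the proofs are below) =====
def Claim_equal_solution : Prop := ∀ (s : String), Dom_solution s → Spec_solution s (solution s)

-- ===== LEMMAS AND PROOFS =====

-- run-length groups of a chunk list (proof-only specification device)
def runGroups (k : Int) (p : List Char) : List (List Char) → List (List Char × Int)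
  | [] => [(p, k)]
  | c :: rest => if p = c then runGroups (k + 1) p rest else (p, k) :: runGroups 1 c rest

-- what A appends for a non-final group
def encodeGroup (g : List Char × Int) : List Char :=
  if g.2 ≥ 2 then PySem.Int.toChars g.2 ++ g.1 else g.1

-- A's zipString: every group encoded, except the last which is flushed bare
def encLast : List (List Char × Int) → List Char
  | [] => []
  | [g] => g.1
  | g :: h :: t => encodeGroup g ++ encLast (h :: t)

def chunkAt (cs : List Char) (n t : Nat) : List Char := (cs.drop (n * t)).take n

-- the chunks strictly after chunk t, up to and including chunk (len/n)
def restFrom (cs : List Char) (n t : Nat) : List (List Char) :=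
  (List.range (cs.length / n - t)).map (fun j => chunkAt cs n (t + 1 + j))

-- total savings of a group list (what B counts)
def savedOf : List (List Char × Int) → Int
  | [] => 0
  | (p, c) :: gs =>
    (if c ≥ 2 then (p.length : Int) * (c - 1) - ((PySem.Int.toChars c).length : Int) else 0)
      + savedOf gs

-- total content length of a group list
def contentLen : List (List Char × Int) → Int
  | [] => 0
  | (p, c) :: gs => (p.length : Int) * c + contentLen gs

def chunkStep (st : List Char × Int × List Char) (c : List Char) : List Char × Int × List Char :=
  if st.2.2 = c then (st.1, st.2.1 + 1, st.2.2)
  else if st.2.1 ≥ 2 then (st.1 ++ PySem.Int.toChars st.2.1 ++ st.2.2, 1, c)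
  else (st.1 ++ st.2.2, 1, c)

theorem zipStep_eq (i : Int) (cs : List Char) (st : List Char × Int × List Char) (j : Int) :
    zipStep i cs st j = chunkStep st (PySem.List.slice cs (some j) (some (j + i))) := rfl

theorem pyRange_A (L n : Nat) (hn : 1 ≤ n) :
    PySem.List.pyRange (n : Int) ((L : Int) + 1) (n : Int)
      = (List.range (L / n)).map (fun k : Nat => ((n : Int) + (n : Int) * (k : Int))) := by
  rw [PySem.List.pyRange_of_pos _ _ (by exact_mod_cast hn)]
  have hcnt : (if (n : Int) < (L : Int) + 1 then (((L : Int) + 1 - n + n - 1) / n).toNat else 0)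
      = L / n := by
    by_cases h : n ≤ L
    · rw [if_pos (by exact_mod_cast Nat.lt_succ_of_le h)]
      have h2 : ((L : Int) + 1 - n + n - 1) = ((L : Nat) : Int) := by ring
      rw [h2, ← Int.natCast_div, Int.toNat_natCast]
    · rw [if_neg (by exact_mod_cast Nat.not_lt.mpr (by omega))]
      rw [Nat.div_eq_of_lt (by omega)]
  rw [hcnt]

theorem chunkAt_full_len (cs : List Char) (n t : Nat) (h : n * (t + 1) ≤ cs.length) :
    (chunkAt cs n t).length = n := by
  have h2 : n * (t + 1) = n * t + n := by ring
  simp [chunkAt, List.length_take, List.length_drop]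
  omega

theorem runGroups_ne_nil (l : List (List Char)) (k : Int) (p : List Char) :
    runGroups k p l ≠ [] := by
  induction l generalizing k p with
  | nil => simp [runGroups]
  | cons c rest ih => simp only [runGroups]; split_ifs <;> simp [ih]

theorem encLast_cons (g : List Char × Int) (gs : List (List Char × Int)) (h : gs ≠ []) :
    encLast (g :: gs) = encodeGroup g ++ encLast gs := by
  cases gs with
  | nil => simp at h
  | cons h t => rfl

theorem foldl_chunkStep (l : List (List Char)) (z : List Char) (k : Int) (p : List Char) :
    (l.foldl chunkStep (z, k, p)).1 ++ (l.foldl chunkStep (z, k, p)).2.2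
      = z ++ encLast (runGroups k p l) := by
  induction l generalizing z k p with
  | nil => simp [encLast, runGroups]
  | cons c rest ih =>
    simp only [List.foldl_cons, chunkStep, runGroups]
    by_cases hpc : p = c
    · simp only [hpc]
      exact ih z (k+1) c
    · rw [if_neg hpc, if_neg hpc,
        encLast_cons _ _ (runGroups_ne_nil rest 1 c)]
      by_cases hk : k ≥ 2
      · rw [if_pos hk]
        rw [ih (z ++ PySem.Int.toChars k ++ p) 1 c]
        simp [encodeGroup, hk]
      · rw [if_neg hk]
        rw [ih (z ++ p) 1 c]
        simp [encodeGroup, hk]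

theorem runGroups_getLast (l : List (List Char)) (k : Int) (p : List Char) (a : List Char)
    (h : l.getLast? = some a) (hne : ∀ x ∈ p :: l.dropLast, x ≠ a) :
    (runGroups k p l).getLast? = some (a, 1) := by
  induction l generalizing k p with
  | nil => simp at h
  | cons c rest ih =>
    cases rest with
    | nil =>
      simp only [List.getLast?_singleton, Option.some.injEq] at h
      subst h
      have hpa := hne p (by simp)
      simp only [runGroups, if_neg hpa]
      simp
    | cons c2 rest2 =>
      rw [List.getLast?_cons_cons] at h
      rw [List.dropLast_cons₂] at hne
      rw [runGroups]
      by_cases hpc : p = c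
      · rw [if_pos hpc]
        subst hpc
        apply ih _ _ h
        intro x hx
        rcases List.mem_cons.mp hx with h1 | h2
        · exact hne x (by simp [h1])
        · exact hne x (by simp [List.mem_cons.mpr (Or.inr h2)])
      · rw [if_neg hpc]
        have htail := ih 1 c h (by
          intro x hx
          rcases List.mem_cons.mp hx with h1 | h2
          · exact hne x (by simp [h1])
          · exact hne x (by simp [List.mem_cons.mpr (Or.inr h2)]))
        obtain ⟨g, gs, hgl⟩ := List.exists_cons_of_ne_nil (runGroups_ne_nil (c2 :: rest2) 1 c)
        rw [hgl, List.getLast?_cons_cons, ← hgl]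
        exact htail

theorem sideA (cs : List Char) (n : Nat) (hn : 1 ≤ n) :
    zipLen cs (n : Int)
      = (((encLast (runGroups 1 (chunkAt cs n 0)
          ((List.range (cs.length / n)).map (fun k => chunkAt cs n (k + 1))))).length : Int)) := by
  unfold zipLen
  rw [pyRange_A cs.length n hn, List.foldl_map]
  have hinit : PySem.List.slice cs (some 0) (some (n : Int)) = chunkAt cs n 0 := by
    simp [chunkAt]
  rw [hinit]
  have hcong := PySem.List.foldl_congr_mem (List.range (cs.length / n))
    (fun (x : List Char × Int × List Char) (y : Nat) => zipStep (n : Int) cs x ((n : Int) + (n : Int) * (y : Int)))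
    (fun st k => chunkStep st (chunkAt cs n (k + 1)))
    (([], 1, chunkAt cs n 0))
    (by
      intro acc x _
      show zipStep (n : Int) cs acc ((n : Int) + (n : Int) * (x : Int))
        = chunkStep acc (chunkAt cs n (x + 1))
      rw [zipStep_eq]
      have hj : ((n : Int) + (n : Int) * (x : Int)) = ((n * (x + 1) : Nat) : Int) := by
        push_cast; ring
      rw [hj, PySem.List.slice_natCast_add]
      rfl)
  rw [hcong, ← List.foldl_map]
  show ((((List.foldl chunkStep ([], 1, chunkAt cs n 0)
      ((List.range (cs.length / n)).map (fun k => chunkAt cs n (k + 1)))).1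
      ++ (List.foldl chunkStep ([], 1, chunkAt cs n 0)
      ((List.range (cs.length / n)).map (fun k => chunkAt cs n (k + 1)))).2.2).length : Int)) = _
  rw [foldl_chunkStep]
  simp

-- the slice s[n*t : n*t+n] is chunk t
theorem slice_chunk (cs : List Char) (n t : Nat) :
    PySem.List.slice cs (some ((n * t : Nat) : Int)) (some (((n * t : Nat) : Int) + (n : Int)))
      = chunkAt cs n t := PySem.List.slice_natCast_add cs (n * t) n

theorem restFrom_cons (cs : List Char) (n t : Nat) (ht : t < cs.length / n) :
    restFrom cs n t = chunkAt cs n (t + 1) :: restFrom cs n (t + 1) := by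
  unfold restFrom
  rw [show cs.length / n - t = (cs.length / n - (t + 1)) + 1 by omega, List.range_succ_eq_map]
  simp only [List.map_cons, List.map_map]
  congr 1
  apply List.map_congr_left
  intro j _
  simp only [Function.comp, Nat.succ_eq_add_one]
  congr 1
  omega

theorem contentLen_runGroups (l : List (List Char)) (k : Int) (p : List Char) :
    contentLen (runGroups k p l)
      = (p.length : Int) * k + ((l.map (fun c => ((c.length : Nat) : Int))).sum) := by
  induction l generalizing k p with
  | nil => simp [runGroups, contentLen]
  | cons c rest ih =>
    simp only [runGroups, List.map_cons, List.sum_cons]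
    by_cases hpc : p = c
    · rw [if_pos hpc, ih, hpc]; ring
    · rw [if_neg hpc]
      simp only [contentLen, ih]
      ring

theorem runGroups_pos (l : List (List Char)) (k : Int) (p : List Char) (hk : 1 ≤ k) :
    ∀ g ∈ runGroups k p l, 1 ≤ g.2 := by
  induction l generalizing k p with
  | nil => intro g hg; simp [runGroups] at hg; subst hg; exact hk
  | cons c rest ih =>
    intro g hg
    simp only [runGroups] at hg
    by_cases hpc : p = c
    · rw [if_pos hpc] at hg
      exact ih (k + 1) p (by omega) g hg
    · rw [if_neg hpc] at hg
      rcases List.mem_cons.mp hg with h | h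
      · subst h; exact hk
      · exact ih 1 c le_rfl g h

theorem encLast_length (gs : List (List Char × Int)) (h1 : ∀ g ∈ gs, 1 ≤ g.2)
    (h2 : ∀ a, gs.getLast? = some a → a.2 = 1) :
    ((encLast gs).length : Int) = contentLen gs - savedOf gs := by
  induction gs with
  | nil => simp [encLast, contentLen, savedOf]
  | cons g t ih =>
    cases t with
    | nil =>
      have hg2 : g.2 = 1 := h2 g (by simp)
      obtain ⟨p, c⟩ := g
      simp only at hg2
      subst hg2
      simp [encLast, contentLen, savedOf]
    | cons g2 t2 =>
      rw [encLast_cons _ _ (by simp)]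
      have hih := ih (fun x hx => h1 x (by simp [hx]))
        (fun a ha => h2 a (by rw [List.getLast?_cons_cons]; exact ha))
      have hg1 : 1 ≤ g.2 := h1 g (by simp)
      obtain ⟨p, c⟩ := g
      simp only at hg1
      have hcl : contentLen ((p, c) :: g2 :: t2)
          = (p.length : Int) * c + contentLen (g2 :: t2) := rfl
      have hsv : savedOf ((p, c) :: g2 :: t2)
          = (if c ≥ 2 then (p.length : Int) * (c - 1)
              - ((PySem.Int.toChars c).length : Int) else 0) + savedOf (g2 :: t2) := rfl
      rw [hcl, hsv]
      simp only [encodeGroup]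
      by_cases hc : c ≥ 2
      · rw [if_pos hc, if_pos hc]
        push_cast [List.length_append]
        rw [hih]
        ring
      · rw [if_neg hc, if_neg hc]
        have hc1 : c = 1 := by omega
        subst hc1
        push_cast [List.length_append]
        rw [hih]
        ring

theorem sum_chunk_len (cs : List Char) (n : Nat) (hn : 1 ≤ n) :
    ∀ m, ((List.range m).map (fun t => (chunkAt cs n t).length)).sum = min cs.length (n * m) := by
  intro m
  induction m with
  | zero => simp
  | succ m ih =>
    rw [List.range_succ, List.map_append, List.sum_append]
    simp only [List.map_cons, List.map_nil, List.sum_cons, List.sum_nil, ih]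
    have hl : (chunkAt cs n m).length = min n (cs.length - n * m) := by
      simp [chunkAt, List.length_take, List.length_drop]
    rw [hl]
    have : n * (m + 1) = n * m + n := by ring
    omega

-- the inner while loop walks to the end of the current run of equal chunks
theorem runLoop_run (cs : List Char) (n : Nat) (hn : 1 ≤ n) :
    ∀ m t (a : Int) fuel, cs.length / n - t = m → t < cs.length / n → m ≤ fuel →
    ∃ e : Nat, t + e < cs.length / n ∧
      runLoop cs (n : Int) fuel ((n * t : Nat) : Int) a = (((n * (t + e) : Nat) : Int), a + (e : Int)) ∧
      runGroups a (chunkAt cs n t) (restFrom cs n t)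
        = (chunkAt cs n t, a + (e : Int))
            :: runGroups 1 (chunkAt cs n (t + e + 1)) (restFrom cs n (t + e + 1)) := by
  intro m
  induction m with
  | zero => intro t a fuel hm ht _; omega
  | succ m ih =>
    intro t a fuel hm ht hf
    obtain ⟨f, rfl⟩ : ∃ f, fuel = f + 1 := ⟨fuel - 1, by omega⟩
    have hq := Nat.div_mul_le_self cs.length n
    have hfull : (chunkAt cs n t).length = n :=
      chunkAt_full_len cs n t (by
        have : n * (t + 1) ≤ n * (cs.length / n) := Nat.mul_le_mul_left n (by omega)
        calc n * (t + 1) ≤ n * (cs.length / n) := this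
          _ ≤ cs.length := by rw [Nat.mul_comm]; exact hq)
    have s2 : PySem.List.slice cs (some (((n * t : Nat) : Int) + (n : Int)))
          (some (((n * t : Nat) : Int) + 2 * (n : Int))) = chunkAt cs n (t + 1) := by
      rw [show ((n * t : Nat) : Int) + 2 * (n : Int) = ((n * (t + 1) : Nat) : Int) + (n : Int) by
        push_cast; ring]
      rw [show ((n * t : Nat) : Int) + (n : Int) = ((n * (t + 1) : Nat) : Int) by push_cast; ring]
      exact slice_chunk cs n (t + 1)
    have hcond : (PySem.List.slice cs (some ((n * t : Nat) : Int))
          (some (((n * t : Nat) : Int) + (n : Int)))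
        = PySem.List.slice cs (some (((n * t : Nat) : Int) + (n : Int)))
          (some (((n * t : Nat) : Int) + 2 * (n : Int))))
        ↔ chunkAt cs n t = chunkAt cs n (t + 1) := by
      rw [slice_chunk cs n t, s2]
    simp only [runLoop]
    by_cases hpc : chunkAt cs n t = chunkAt cs n (t + 1)
    · rw [if_pos (hcond.mpr hpc)]
      have ht1 : t + 1 < cs.length / n := by
        by_contra hno
        have hteq : t + 1 = cs.length / n := by omega
        have hlen : (chunkAt cs n (t + 1)).length ≤ cs.length - n * (t + 1) := by
          simp only [chunkAt, List.length_take, List.length_drop]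
          exact Nat.min_le_right _ _
        have hlt : cs.length - n * (t + 1) < n := by
          have hdm' := Nat.div_add_mod cs.length n
          have hmod' := Nat.mod_lt cs.length (show 0 < n by omega)
          have hcm : n * (cs.length / n) = cs.length / n * n := Nat.mul_comm _ _
          have hrw : n * (t + 1) = n * (cs.length / n) := by rw [hteq]
          omega
        rw [hpc] at hfull
        rw [hfull] at hlen
        omega
      obtain ⟨e', he1, he2, he3⟩ := ih (t + 1) (a + 1) f (by omega) ht1 (by omega)
      refine ⟨e' + 1, by omega, ?_, ?_⟩
      · have ek : ((n * t : Nat) : Int) + (n : Int) = ((n * (t + 1) : Nat) : Int) := by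
          push_cast; ring
        rw [ek, he2]
        simp only [Prod.mk.injEq]
        constructor
        · congr 1; ring_nf
        · push_cast; ring
      · rw [restFrom_cons cs n t ht, runGroups, if_pos hpc]
        have he3' : runGroups (a + 1) (chunkAt cs n t) (restFrom cs n (t + 1))
            = (chunkAt cs n (t + 1), (a + 1) + (e' : Int))
                :: runGroups 1 (chunkAt cs n ((t + 1) + e' + 1)) (restFrom cs n ((t + 1) + e' + 1)) := by
          rw [hpc]; exact he3
        rw [he3', ← hpc, show t + 1 + e' + 1 = t + (e' + 1) + 1 by omega,
          show a + 1 + (e' : Int) = a + ((e' + 1 : Nat) : Int) by push_cast; ring]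
    · rw [if_neg (fun h => hpc (hcond.mp h))]
      refine ⟨0, by omega, by simp, ?_⟩
      rw [restFrom_cons cs n t ht, runGroups, if_neg hpc]
      simp

-- the outer while loop accumulates exactly the group savings
theorem savedLoop_eq (cs : List Char) (n : Nat) (hn : 1 ≤ n) :
    ∀ m t (saved : Int) fuel, cs.length / n - t = m → t ≤ cs.length / n → m < fuel →
    savedLoop cs (n : Int) fuel ((n * t : Nat) : Int) saved
      = saved + savedOf (runGroups 1 (chunkAt cs n t) (restFrom cs n t)) := by
  intro m
  induction m using Nat.strong_induction_on with
  | _ m ih =>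
    intro t saved fuel hm ht hf
    obtain ⟨f, rfl⟩ : ∃ f, fuel = f + 1 := ⟨fuel - 1, by omega⟩
    have hq := Nat.div_mul_le_self cs.length n
    have hmod := Nat.mod_lt cs.length (by omega : 0 < n)
    have hdm := Nat.div_add_mod cs.length n
    simp only [savedLoop]
    by_cases hg : ((n * t : Nat) : Int) + (n : Int) < (cs.length : Int)
    · have hg' : n * (t + 1) < cs.length := by
        have : ((n * (t + 1) : Nat) : Int) < (cs.length : Int) := by push_cast at hg ⊢; linarith
        exact_mod_cast this
      have ht' : t < cs.length / n := by
        by_contra hno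
        have hteq : t = cs.length / n := by omega
        subst hteq
        have hb : n * (cs.length / n + 1) = cs.length / n * n + n := by ring
        omega
      rw [if_pos hg]
      obtain ⟨e, he1, he2, he3⟩ := runLoop_run cs n hn (cs.length / n - t) t 1 cs.length rfl ht'
        (by have := Nat.div_le_self cs.length n; omega)
      rw [he2]
      have hfull : (chunkAt cs n t).length = n :=
        chunkAt_full_len cs n t (by
          have h1 : n * (t + 1) ≤ n * (cs.length / n) := Nat.mul_le_mul_left n (by omega)
          have hb2 : n * (cs.length / n) = cs.length / n * n := Nat.mul_comm _ _
          omega)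
      have hrec : savedLoop cs (n : Int) f (((n * (t + e) : Nat) : Int) + (n : Int))
            (if (1 : Int) + (e : Int) ≥ 2 then
              saved + ((n : Int) * ((1 : Int) + (e : Int) - 1)
                - ((PySem.Int.toChars ((1 : Int) + (e : Int))).length : Int)) else saved)
          = (if (1 : Int) + (e : Int) ≥ 2 then
              saved + ((n : Int) * ((1 : Int) + (e : Int) - 1)
                - ((PySem.Int.toChars ((1 : Int) + (e : Int))).length : Int)) else saved)
            + savedOf (runGroups 1 (chunkAt cs n (t + e + 1)) (restFrom cs n (t + e + 1))) := by
        have ek : ((n * (t + e) : Nat) : Int) + (n : Int) = ((n * (t + e + 1) : Nat) : Int) := by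
          push_cast; ring
        rw [ek]
        exact ih (cs.length / n - (t + e + 1)) (by omega) (t + e + 1) _ f rfl (by omega) (by omega)
      simp only [ge_iff_le] at hrec ⊢
      rw [hrec, he3]
      simp only [savedOf, hfull]
      by_cases he0 : (2 : Int) ≤ 1 + (e : Int)
      · rw [if_pos he0, if_pos he0]
        ring
      · rw [if_neg he0, if_neg he0]
        ring
    · rw [if_neg hg]
      have hg' : cs.length ≤ n * (t + 1) := by
        have : (cs.length : Int) ≤ ((n * (t + 1) : Nat) : Int) := by push_cast at hg ⊢; linarith
        exact_mod_cast this
      by_cases hteq : t = cs.length / n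
      · subst hteq
        unfold restFrom
        simp only [Nat.sub_self, List.range_zero, List.map_nil]
        simp [runGroups, savedOf]
      · have ht' : t < cs.length / n := by omega
        have hteq1 : t + 1 = cs.length / n := by
          by_contra hno
          have h2 : t + 2 ≤ cs.length / n := by omega
          have h3 : n * (t + 2) ≤ n * (cs.length / n) := Nat.mul_le_mul_left n h2
          have hb1 : n * (t + 2) = n * (t + 1) + n := by ring
          have hb2 : n * (cs.length / n) = cs.length / n * n := Nat.mul_comm _ _
          omega
        have hb3 : n * (t + 1) = n * (cs.length / n) := by rw [hteq1]
        have hb2 : n * (cs.length / n) = cs.length / n * n := Nat.mul_comm _ _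
        have hdvd : cs.length = n * (cs.length / n) := by omega
        have hlast : chunkAt cs n (t + 1) = [] := by
          have : cs.drop (n * (t + 1)) = [] := by
            apply List.drop_eq_nil_of_le
            omega
          simp [chunkAt, this]
        have hfull : (chunkAt cs n t).length = n :=
          chunkAt_full_len cs n t (by omega)
        have hne : chunkAt cs n t ≠ chunkAt cs n (t + 1) := by
          rw [hlast]
          intro hcontra
          rw [hcontra] at hfull
          simp at hfull
          omega
        rw [restFrom_cons cs n t ht']
        rw [runGroups, if_neg hne]
        unfold restFrom
        rw [hteq1]
        simp only [Nat.sub_self, List.range_zero, List.map_nil]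
        simp [runGroups, savedOf]

theorem sum_cast_map (f : Nat → Nat) (l : List Nat) :
    (l.map (fun k => ((f k : Nat) : Int))).sum = (((l.map f).sum : Nat) : Int) := by
  induction l with
  | nil => simp
  | cons a t ih =>
    simp only [List.map_cons, List.sum_cons, ih]
    push_cast
    ring

-- per-chunk-size bridge: A's compressed length = len(s) - B's savings
theorem perI (cs : List Char) (n : Nat) (hn : 1 ≤ n) :
    zipLen cs (n : Int)
      = (cs.length : Int) - savedLoop cs (n : Int) (cs.length + 1) 0 0 := by
  have hq := Nat.div_mul_le_self cs.length n
  have hmod := Nat.mod_lt cs.length (by omega : 0 < n)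
  have hdm := Nat.div_add_mod cs.length n
  have hqle := Nat.div_le_self cs.length n
  obtain ⟨q, hqdef⟩ : ∃ q, cs.length / n = q := ⟨_, rfl⟩
  rw [hqdef] at hq hdm hqle
  have hrest : (List.range q).map (fun k => chunkAt cs n (k + 1)) = restFrom cs n 0 := by
    unfold restFrom
    rw [hqdef, Nat.sub_zero]
    apply List.map_congr_left
    intro j _
    congr 1
    omega
  have hzero : ((n * 0 : Nat) : Int) = 0 := by simp
  have hsl : savedLoop cs (n : Int) (cs.length + 1) 0 0
      = savedOf (runGroups 1 (chunkAt cs n 0) (restFrom cs n 0)) := by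
    have := savedLoop_eq cs n hn q 0 0 (cs.length + 1) (by simpa using hqdef)
      (Nat.zero_le _) (by omega)
    rw [hzero] at this
    simpa using this
  set G := runGroups 1 (chunkAt cs n 0) (restFrom cs n 0) with hG
  have hlastc : ∀ a, G.getLast? = some a → a.2 = 1 := by
    intro a ha
    by_cases hq0 : q = 0
    · have : G = [(chunkAt cs n 0, 1)] := by
        rw [hG]
        unfold restFrom
        rw [hqdef, hq0]
        simp [runGroups]
      rw [this] at ha
      simp only [List.getLast?_singleton, Option.some.injEq] at ha
      rw [← ha]
    · have hq1 : 1 ≤ q := by omega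
      have hlastr : (restFrom cs n 0).getLast? = some (chunkAt cs n q) := by
        rw [← hrest]
        rw [show q = (q - 1) + 1 by omega, List.range_succ, List.map_append]
        simp only [List.map_cons, List.map_nil]
        rw [List.getLast?_concat]
      have hlenq : (chunkAt cs n q).length = cs.length % n := by
        have hb2 : n * q = q * n := Nat.mul_comm _ _
        simp only [chunkAt, List.length_take, List.length_drop]
        omega
      have hne : ∀ x ∈ chunkAt cs n 0 :: (restFrom cs n 0).dropLast, x ≠ chunkAt cs n q := by
        rw [← hrest, show q = (q - 1) + 1 by omega, List.range_succ, List.map_append]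
        simp only [List.map_cons, List.map_nil]
        rw [List.dropLast_concat]
        intro x hx
        have hfx : ∃ t, t < q ∧ x = chunkAt cs n t := by
          rcases List.mem_cons.mp hx with h0 | h1
          · exact ⟨0, by omega, h0⟩
          · obtain ⟨k, hk, he⟩ := by simpa using h1
            exact ⟨k + 1, by omega, he.symm⟩
        obtain ⟨t, htq, rfl⟩ := hfx
        have hfull : (chunkAt cs n t).length = n :=
          chunkAt_full_len cs n t (by
            have : n * (t + 1) ≤ n * q := Nat.mul_le_mul_left n (by omega)
            omega)
        intro he
        rw [show q - 1 + 1 = q by omega] at he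
        rw [he, hlenq] at hfull
        omega
      have := runGroups_getLast (restFrom cs n 0) 1 (chunkAt cs n 0) (chunkAt cs n q) hlastr hne
      rw [← hG] at this
      rw [this] at ha
      injection ha with ha
      rw [← ha]
  have hcl : contentLen G = (cs.length : Int) := by
    rw [hG, contentLen_runGroups, ← hrest, List.map_map]
    -- Nat-level chunk sum
    have hnat : ((List.range (q + 1)).map (fun t => (chunkAt cs n t).length)).sum = cs.length := by
      rw [sum_chunk_len cs n hn (q + 1)]
      have : n * (q + 1) = n * q + n := by ring
      omega
    rw [List.range_succ_eq_map, List.map_cons, List.sum_cons, List.map_map] at hnat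
    have hnat' : (chunkAt cs n 0).length
        + ((List.range q).map (fun k => (chunkAt cs n (k + 1)).length)).sum = cs.length := hnat
    have hcast : (List.range q).map
          ((fun c : List Char => ((c.length : Nat) : Int)) ∘ (fun k => chunkAt cs n (k + 1)))
        = (List.range q).map (fun k => (((chunkAt cs n (k + 1)).length : Nat) : Int)) := rfl
    rw [hcast, sum_cast_map (fun k => (chunkAt cs n (k + 1)).length) (List.range q)]
    omega
  rw [sideA cs n hn, hqdef, hrest, ← hG, hsl]
  rw [encLast_length G (runGroups_pos _ 1 _ le_rfl) hlastc, hcl]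

theorem ranges_eq (s : String) :
    PySem.List.pyRange 1 (PySem.Int.truncdiv (PySem.Str.len s) 2 + 2) 1
      = PySem.List.pyRange 1 (PySem.Int.floordiv (PySem.Str.len s) 2 + 2) 1 := by
  rw [PySem.Str.len_eq]
  have hdiv : PySem.Int.truncdiv (s.toList.length : Int) 2
      = PySem.Int.floordiv (s.toList.length : Int) 2 := by
    simp [PySem.Int.truncdiv, PySem.Int.floordiv, Int.fdiv_eq_ediv_of_nonneg]
  rw [hdiv]

-- ===== VERDICT (by name: the statement is the Claim_ definition above) =====
theorem solution_spec : Claim_equal_solution := by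
  intro s _
  unfold Spec_solution solution solution_alt
  rw [ranges_eq]
  simp only [PySem.Str.len_eq]
  apply PySem.List.foldl_congr_mem
  intro acc x hx
  have hx1 : 1 ≤ x := by
    have := (PySem.List.mem_pyRange_one.mp hx).1; omega
  have h0 : 0 ≤ x := by omega
  lift x to Nat using h0 with n
  have hn : 1 ≤ n := by exact_mod_cast hx1
  simp only [perI s.toList n hn]
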